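-- pv_equiv track=rewrite | github.com/ukoloff/stepik-53634 | 2-enum/2.9.7-band.py | bands
-- ===== SOURCE A (Python) =====
-- def bands(n, m):
--     """
--     Расстановка фишек. Имеется полоса размера 1×n,
--     разбитая на единичные клетки.
--     Нужно расставить в клетках полосы m фишек,
--     чтобы никакие две фишки не стояли в соседних клетках.
--     Выведите все возможные расстановки.
--
--     Входные данные: Натуральные числа n и m.
--     """
--     if m == 0:
--         if n >= 0:
--             yield '.' * n
--         return
--     if n < 2 * m - 1:
--         return
--     if n == 2 * m - 1:
--         yield ('.*' * m)[1:]
--         return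
--     yield from ('*.' + tail for tail in bands(n - 2, m - 1))
--     yield from ('.' + tail for tail in bands(n - 1, m))
-- ===== SOURCE B (Python) =====
-- def bands(n, m):
--     """Same placements as A, computed bottom-up: for mm = 1..m build the table of
--     all placements of mm chips on every strip length the next level can need
--     (iterative DP over the chip count instead of A's recursion on the first cell)."""
--     if m < 0:
--         return
--     if m == 0:
--         yield '.' * n
--         return
--     s = n - (2 * m - 1)          # slack beyond the tight strip
--     if s < 0:
--         return
--     # level[l - (2*mm - 1)] = placements of mm chips on a strip of length l,
--     # ordered with the leftmost chip position increasing (= lexicographic, '*' < '.')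
--     level = [['.' * i + '*' + '.' * (l - 1 - i) for i in range(l)]
--              for l in range(1, s + 2)]                      # mm = 1
--     for mm in range(2, m + 1):
--         base = 2 * mm - 1
--         level = [['.' * i + '*.' + tail
--                   for i in range(l - base + 1)
--                   for tail in level[l - i - base]]
--                  for l in range(base, base + s + 1)]
--     yield from level[s]
-- ===== Notes on version B (the rewrite author's own statement) =====
-- stated objective: alternative
-- what changed: B computes the placements bottom-up with an iterative DP over the chip count (a table of all placements per strip length, one level per chip) instead of A's top-down binary empty/occupied recursion on the first cell.
-- outside the precondition, e.g. on bands(-1, 0): A returns [], B returns ['']; on bands(-7, -2): A returns [], B returns []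
import Mathlib
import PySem

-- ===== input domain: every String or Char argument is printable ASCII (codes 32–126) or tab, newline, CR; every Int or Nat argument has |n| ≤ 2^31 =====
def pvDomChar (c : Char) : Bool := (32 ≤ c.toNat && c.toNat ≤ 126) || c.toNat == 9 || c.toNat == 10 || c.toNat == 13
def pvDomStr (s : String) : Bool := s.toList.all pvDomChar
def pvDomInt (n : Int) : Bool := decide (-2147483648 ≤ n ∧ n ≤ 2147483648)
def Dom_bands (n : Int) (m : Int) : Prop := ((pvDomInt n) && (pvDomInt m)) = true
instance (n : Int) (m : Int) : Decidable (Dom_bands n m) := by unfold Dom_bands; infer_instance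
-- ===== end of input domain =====

-- B builds the placements bottom-up (an iterative DP over the chip count, one table per
-- level) instead of A's top-down binary recursion on the first cell; objective: alternative.

-- ===== PORT A =====
-- A is a generator; its port returns the list of yielded strings.  A's recursion has no
-- structural measure (it recurses forever for m < 0, n ≥ 2*m-1), so the port carries a
-- fuel argument that only makes the recursion total; fuel n.toNat+1 suffices on Pre_.
-- Strings are built on the List Char side (PySem convention) and wrapped at the end.
def bandsCore : Nat → Int → Int → List (List Char)
  | 0, _, _ => []
  | fuel+1, n, m =>
    if m = 0 then
      (if n ≥ 0 then [PySem.List.pyRepeat ['.'] n] else [])   -- yield '.' * n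
    else if n < 2 * m - 1 then []
    else if n = 2 * m - 1 then
      [PySem.List.slice (PySem.List.pyRepeat ['.', '*'] m) (some 1) none]   -- ('.*'*m)[1:]
    else
      (bandsCore fuel (n - 2) (m - 1)).map (fun tail => '*' :: '.' :: tail)
        ++ (bandsCore fuel (n - 1) m).map (fun tail => '.' :: tail)

def bands (n : Int) (m : Int) : List String :=
  (bandsCore (n.toNat + 1) n m).map String.ofList

-- ===== PORT B =====
-- the mm = 1 table: for each strip length l = 1 .. s+1, the l one-chip placements
def bandsAltLevel1 (s : Int) : List (List (List Char)) :=
  (PySem.List.pyRange 1 (s + 2) 1).map (fun l =>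
    (PySem.List.pyRange 0 l 1).map
      (fun i => PySem.List.pyRepeat ['.'] i ++ '*' :: PySem.List.pyRepeat ['.'] (l - 1 - i)))

-- one DP step: the mm-chip table from the (mm-1)-chip table (level[l - i - base] is a
-- provably in-range list index, ported as pyGetD with default [])
def bandsAltStep (s : Int) (level : List (List (List Char))) (mm : Int) :
    List (List (List Char)) :=
  (PySem.List.pyRange (2 * mm - 1) (2 * mm - 1 + s + 1) 1).map (fun l =>
    ((PySem.List.pyRange 0 (l - (2 * mm - 1) + 1) 1).map (fun i =>
      (PySem.List.pyGetD level (l - i - (2 * mm - 1)) []).map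
        (fun tail => PySem.List.pyRepeat ['.'] i ++ '*' :: '.' :: tail))).flatten)

def bands_alt (n : Int) (m : Int) : List String :=
  if m < 0 then []
  else if m = 0 then [String.ofList (PySem.List.pyRepeat ['.'] n)]
  else if n - (2 * m - 1) < 0 then []
  else
    (PySem.List.pyGetD
      ((PySem.List.pyRange 2 (m + 1) 1).foldl
        (bandsAltStep (n - (2 * m - 1))) (bandsAltLevel1 (n - (2 * m - 1))))
      (n - (2 * m - 1)) []).map String.ofList

-- ===== PRECONDITION & SPEC =====
-- Pre_ excludes m < 0, where A hits unbounded recursion (RecursionError) whenever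
-- n ≥ 2*m-1 and returns [] only incidentally otherwise, and n < 0 with m = 0, an
-- out-of-domain corner where A's [] and B's [''] are equally defensible.
def Pre_bands (n : Int) (m : Int) : Prop := 0 ≤ m ∧ (m = 0 → 0 ≤ n)
instance (n : Int) (m : Int) : Decidable (Pre_bands n m) := by unfold Pre_bands; infer_instance
def pvWitness_bands : Int × Int := (5, 2)

def Spec_bands (n : Int) (m : Int) (out : List String) : Prop := out = bands_alt n m
instance (n : Int) (m : Int) (out : List String) : Decidable (Spec_bands n m out) := by unfold Spec_bands; infer_instance

-- ===== CLAIM (what is proved, stated in full; the proofs are below) =====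
def Claim_equal_bands : Prop := ∀ (n : Int) (m : Int), Dom_bands n m → Pre_bands n m → Spec_bands n m (bands n m)

-- ===== LEMMAS AND PROOFS =====

-- proof-side spec both ports are reduced to: the leftmost-chip enumeration of the
-- placements of k chips on a strip of length n, recursively on k
def bandsGo : Nat → Int → List (List Char)
  | 0, n => [PySem.List.pyRepeat ['.'] n]
  | 1, n =>
    (PySem.List.pyRange 0 n 1).map
      (fun i => PySem.List.pyRepeat ['.'] i ++ '*' :: PySem.List.pyRepeat ['.'] (n - 1 - i))
  | k+2, n =>
    ((PySem.List.pyRange 0 (n - 2 * ((k : Int) + 2) + 2) 1).map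
      (fun i => (bandsGo (k+1) (n - i - 2)).map
        (fun tail => PySem.List.pyRepeat ['.'] i ++ '*' :: '.' :: tail))).flatten

-- the unique placement on the tight strip of 2k+1 cells, zig k = '*' ('.' '*')^k
def zig : Nat → List Char
  | 0 => ['*']
  | k+1 => '*' :: '.' :: zig k

lemma repeat_dotstar (j : Nat) (m : Int) (hm : m = (j : Int) + 1) :
    PySem.List.pyRepeat ['.', '*'] m = '.' :: zig j := by
  induction j generalizing m with
  | zero => subst hm; rfl
  | succ j ih =>
    have h2 : m.toNat = ((j : Int) + 1).toNat + 1 := by omega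
    simp only [PySem.List.pyRepeat, h2, List.replicate_succ, List.flatten_cons]
    have := ih ((j : Int) + 1) rfl
    simp only [PySem.List.pyRepeat] at this
    rw [this]
    rfl

-- the spec yields nothing when k chips cannot fit
lemma go_empty (k : Nat) (n : Int) (hk : 1 ≤ k) (hn : n < 2 * (k : Int) - 1) :
    bandsGo k n = [] := by
  match k, hk with
  | 1, _ =>
    rw [bandsGo, PySem.List.pyRange_one_eq_nil (by omega)]; rfl
  | (j+2), _ =>
    rw [bandsGo, PySem.List.pyRange_one_eq_nil (by omega)]; rfl

-- the spec on the tight strip n = 2*k+1 (that is k+1 chips): the single forced placement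
lemma go_diag (k : Nat) : ∀ (n : Int), n = 2 * (k : Int) + 1 →
    bandsGo (k+1) n = [zig k] := by
  induction k with
  | zero =>
    intro n hn; subst hn; rfl
  | succ j ih =>
    intro n hn
    rw [bandsGo]
    rw [show n - 2 * ((j : Int) + 2) + 2 = 1 by omega, PySem.List.pyRange_one_cons (by omega),
        PySem.List.pyRange_one_eq_nil (by omega)]
    simp only [List.map_cons, List.map_nil]
    rw [ih (n - 0 - 2) (by omega)]
    simp [zig]

-- the spec's k = 1 list satisfies A's head-cell recurrence (for n ≥ 2)
lemma go_split_one (n : Int) (hn : 2 ≤ n) :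
    bandsGo 1 n =
      ('*' :: '.' :: PySem.List.pyRepeat ['.'] (n - 2))
        :: (bandsGo 1 (n - 1)).map (fun t => '.' :: t) := by
  rw [bandsGo, bandsGo]
  rw [PySem.List.pyRange_one_cons (by omega)]
  rw [List.map_cons]
  congr 1
  · simp only [PySem.List.pyRepeat_singleton]
    have h1 : (n - 1 - 0) = (n - 1) := by omega
    have h2 : (n - 1).toNat = (n - 2).toNat + 1 := by omega
    simp [h1, h2, List.replicate_succ]
  · rw [PySem.List.pyRange_one, PySem.List.pyRange_one, List.map_map, List.map_map, List.map_map]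
    rw [show (n - (0 + 1)).toNat = (n - 1 - 0).toNat by omega]
    apply List.map_congr_left
    intro k _
    simp only [Function.comp_apply, PySem.List.pyRepeat_singleton]
    have h3 : (0 + 1 + (k : Int)).toNat = (0 + (k : Int)).toNat + 1 := by omega
    have h4 : n - 1 - (0 + 1 + (k : Int)) = n - 1 - 1 - (0 + (k : Int)) := by omega
    rw [h3, h4, List.replicate_succ, List.cons_append]

-- the spec's k ≥ 2 list satisfies A's head-cell recurrence (for n ≥ 2*m-1)
lemma go_split (j : Nat) (n : Int) (hn : 2 * (j : Int) + 3 ≤ n) :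
    bandsGo (j+2) n =
      (bandsGo (j+1) (n - 2)).map (fun t => '*' :: '.' :: t)
        ++ (bandsGo (j+2) (n - 1)).map (fun t => '.' :: t) := by
  rw [bandsGo]
  rw [PySem.List.pyRange_one_cons (by omega)]
  rw [List.map_cons, List.flatten_cons]
  congr 1
  · rw [show n - 0 - 2 = n - 2 by omega]
    apply List.map_congr_left
    intro t _
    simp [PySem.List.pyRepeat]
  · conv_rhs => rw [bandsGo]
    rw [List.map_flatten, List.map_map]
    rw [PySem.List.pyRange_one, PySem.List.pyRange_one, List.map_map, List.map_map]
    rw [show (n - 2 * ((j : Int) + 2) + 2 - (0 + 1)).toNat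
          = (n - 1 - 2 * ((j : Int) + 2) + 2 - 0).toNat by omega]
    congr 1
    apply List.map_congr_left
    intro k _
    simp only [Function.comp_apply, List.map_map]
    rw [show n - (0 + 1 + (k : Int)) - 2 = n - 1 - (0 + (k : Int)) - 2 by omega]
    apply List.map_congr_left
    intro t _
    simp only [Function.comp_apply, PySem.List.pyRepeat_singleton]
    rw [show (0 + 1 + (k : Int)).toNat = (0 + (k : Int)).toNat + 1 by omega]
    rw [List.replicate_succ, List.cons_append]

-- A side: with enough fuel, A's recursion computes the leftmost-chip enumeration
lemma core_eq (fuel : Nat) : ∀ (n m : Int), 0 ≤ n → 0 ≤ m → n.toNat < fuel →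
    bandsCore fuel n m = bandsGo m.toNat n := by
  induction fuel with
  | zero => intro n m _ _ h; exact absurd h (by omega)
  | succ fuel ih =>
    intro n m hn hm hf
    simp only [bandsCore]
    by_cases hm0 : m = 0
    · subst hm0
      rw [if_pos rfl, if_pos (show n ≥ 0 from hn)]
      rfl
    · have hm1 : 1 ≤ m := by omega
      rw [if_neg hm0]
      by_cases hlt : n < 2 * m - 1
      · rw [if_pos hlt, go_empty m.toNat n (by omega) (by omega)]
      · rw [if_neg hlt]
        by_cases heq : n = 2 * m - 1
        · rw [if_pos heq]
          obtain ⟨j, hj⟩ : ∃ j : Nat, m.toNat = j + 1 := ⟨m.toNat - 1, by omega⟩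
          rw [hj, go_diag j n (by omega), repeat_dotstar j m (by omega),
              PySem.List.slice_from_one]
          rfl
        · rw [if_neg heq]
          have hgt : 2 * m - 1 < n := by omega
          rw [ih (n - 2) (m - 1) (by omega) (by omega) (by omega),
              ih (n - 1) m (by omega) hm (by omega)]
          by_cases hm2 : m = 1
          · subst hm2
            rw [show ((1:Int) - 1).toNat = 0 from rfl, show Int.toNat 1 = 1 from rfl]
            conv_rhs => rw [go_split_one n (by omega)]
            rfl
          · obtain ⟨j, hj⟩ : ∃ j : Nat, m.toNat = j + 2 := ⟨m.toNat - 2, by omega⟩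
            rw [show (m - 1).toNat = j + 1 by omega, hj]
            exact (go_split j n (by omega)).symm

-- B side: the mm = 1 table is the spec's k = 1 lists
lemma level1_spec (s : Int) :
    bandsAltLevel1 s = (PySem.List.pyRange 1 (s + 2) 1).map (fun l => bandsGo 1 l) := by
  rfl

-- B side: one DP step turns the (mm-1)-chip tables into the mm-chip tables
lemma step_spec (s mm : Int) (hs : 0 ≤ s) (hmm : 2 ≤ mm) :
    bandsAltStep s
      ((PySem.List.pyRange (2 * (mm - 1) - 1) (2 * (mm - 1) - 1 + s + 1) 1).map
        (fun l => bandsGo (mm - 1).toNat l)) mm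
      = (PySem.List.pyRange (2 * mm - 1) (2 * mm - 1 + s + 1) 1).map
          (fun l => bandsGo mm.toNat l) := by
  unfold bandsAltStep
  apply List.map_congr_left
  intro l hl
  rw [PySem.List.mem_pyRange_one] at hl
  obtain ⟨j, hj⟩ : ∃ j : Nat, mm.toNat = j + 2 := ⟨mm.toNat - 2, by omega⟩
  rw [hj, bandsGo]
  rw [show l - 2 * ((j : Int) + 2) + 2 = l - (2 * mm - 1) + 1 by omega]
  congr 1
  apply List.map_congr_left
  intro i hi
  rw [PySem.List.mem_pyRange_one] at hi
  rw [show l - i - (2 * mm - 1) = (((l - i - (2 * mm - 1)).toNat : Nat) : Int) by omega]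
  rw [PySem.List.pyGetD_map_pyRange_one _ _ _ _ _ (by omega)]
  rw [show 2 * (mm - 1) - 1 + (((l - i - (2 * mm - 1)).toNat : Nat) : Int) = l - i - 2 by omega]
  rw [show (mm - 1).toNat = j + 1 by omega]

-- B side: the fold builds the m-chip tables for every length 2m-1 .. 2m-1+s
lemma fold_spec (s : Int) (hs : 0 ≤ s) : ∀ (m : Int), 1 ≤ m →
    (PySem.List.pyRange 2 (m + 1) 1).foldl (bandsAltStep s) (bandsAltLevel1 s)
      = (PySem.List.pyRange (2 * m - 1) (2 * m - 1 + s + 1) 1).map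
          (fun l => bandsGo m.toNat l) := by
  intro m hm
  induction m, hm using Int.le_induction with
  | base =>
    rw [PySem.List.pyRange_one_eq_nil (by omega), List.foldl_nil, level1_spec]
    rw [show 2 * (1 : Int) - 1 = 1 by norm_num, show (1 : Int) + s + 1 = s + 2 by ring]
    rfl
  | succ m hm ih =>
    rw [PySem.List.pyRange_one_succ_right (by omega : (2 : Int) ≤ m + 1),
        List.foldl_append, List.foldl_cons, List.foldl_nil, ih]
    have e := step_spec s (m + 1) hs (by omega)
    rw [show m + 1 - 1 = m by ring] at e
    exact e

-- B side: bands_alt computes the leftmost-chip enumeration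
lemma alt_eq (n m : Int) (hm : 0 ≤ m) :
    bands_alt n m = (bandsGo m.toNat n).map String.ofList := by
  by_cases hm0 : m = 0
  · subst hm0; rfl
  · have hm1 : 1 ≤ m := by omega
    unfold bands_alt
    rw [if_neg (by omega : ¬ m < 0), if_neg hm0]
    by_cases hs : n - (2 * m - 1) < 0
    · rw [if_pos hs, go_empty m.toNat n (by omega) (by omega)]
      rfl
    · rw [if_neg hs, fold_spec (n - (2 * m - 1)) (by omega) m hm1]
      rw [show n - (2 * m - 1) = (((n - (2 * m - 1)).toNat : Nat) : Int) by omega]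
      rw [PySem.List.pyGetD_map_pyRange_one _ _ _ _ _ (by omega)]
      rw [show 2 * m - 1 + (((n - (2 * m - 1)).toNat : Nat) : Int) = n by omega]

-- ===== VERDICT (by name: the statement is the Claim_ definition above) =====
theorem bands_spec : Claim_equal_bands := by
  intro n m _ hpre
  obtain ⟨hm0, himp⟩ : 0 ≤ m ∧ (m = 0 → 0 ≤ n) := hpre
  unfold Spec_bands bands
  by_cases hn : 0 ≤ n
  · rw [core_eq (n.toNat + 1) n m hn hm0 (Nat.lt_succ_self _), alt_eq n m hm0]
  · -- n < 0 (so m ≥ 1): both programs return no placement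
    have hm1 : 1 ≤ m := by
      by_cases h : m = 0
      · exact absurd (himp h) hn
      · omega
    simp only [bandsCore]
    rw [if_neg (by omega : ¬ m = 0), if_pos (by omega : n < 2 * m - 1)]
    unfold bands_alt
    rw [if_neg (by omega : ¬ m < 0), if_neg (by omega : ¬ m = 0),
        if_pos (by omega : n - (2 * m - 1) < 0)]
    rfl
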